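-- pv_equiv track=rewrite | github.com/o3x1998/Algorithm | 프로그래머스/unrated/138476. 귤 고르기/귤 고르기.py | solution
-- ===== SOURCE A (Python) =====
-- def solution(k, tangerine):
--     answer = 0
--     dic = {n:0 for n in set(tangerine)}
--     for t in tangerine: dic[t] += 1
--     dic = sorted(dic.items(), reverse=True, key=lambda x: x[1])
--
--     sum = 0
--     for i in range(len(dic)):
--         tmp = (sum + dic[i][1])
--         if tmp >= k:
--             sum += dic[i][1]
--             answer += 1
--             break
--         else:
--             sum += dic[i][1]
--             answer += 1
--
--     return answer
-- ===== SOURCE B (Python) =====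
-- def solution(k, tangerine):
--     if not tangerine:
--         return 0
--     cnt = {}
--     for t in tangerine:
--         cnt[t] = cnt.get(t, 0) + 1
--     buckets = {}
--     for c in cnt.values():
--         buckets[c] = buckets.get(c, 0) + 1
--     maxc = max(buckets)
--     answer = 0
--     s = 0
--     for c in range(maxc, 0, -1):
--         for _ in range(buckets.get(c, 0)):
--             s += c
--             answer += 1
--             if s >= k:
--                 return answer
--     return answer
-- ===== Notes on version B (the rewrite author's own statement) =====
-- stated objective: alternative
-- what changed: Replaces the sort of the per-size counts by a frequency-of-frequencies bucket table scanned from the maximal count downwards, consuming one size at a time until the running sum reaches k.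
import Mathlib
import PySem

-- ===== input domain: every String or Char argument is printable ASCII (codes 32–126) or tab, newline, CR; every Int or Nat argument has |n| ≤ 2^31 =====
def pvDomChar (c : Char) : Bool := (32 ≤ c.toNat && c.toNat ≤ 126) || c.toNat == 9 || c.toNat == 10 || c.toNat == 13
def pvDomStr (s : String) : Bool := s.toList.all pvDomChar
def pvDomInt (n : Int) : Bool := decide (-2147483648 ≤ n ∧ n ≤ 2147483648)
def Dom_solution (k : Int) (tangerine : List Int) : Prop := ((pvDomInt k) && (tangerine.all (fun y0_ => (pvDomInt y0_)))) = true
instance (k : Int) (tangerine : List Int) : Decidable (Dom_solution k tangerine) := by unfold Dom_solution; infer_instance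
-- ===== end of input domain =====

-- B replaces A's sort of the per-size counts by a frequency-of-frequencies bucket table
-- scanned from the maximal count downwards (alternative algorithm, same results).

-- ===== PORT A =====
-- the 'for i in range(len(dic)) … break' loop of A, walking the sorted items with state (sum, answer)
def solLoop (k : Int) : List (Int × Int) → Int → Int → Int
  | [], _, answer => answer
  | p :: rest, s, answer =>
      if s + p.2 ≥ k then answer + 1
      else solLoop k rest (s + p.2) (answer + 1)

def solution (k : Int) (tangerine : List Int) : Int :=
  -- dic = {n:0 for n in set(tangerine)}
  let dic0 : PySem.Dict Int Int :=
    (PySem.Set.ofList tangerine).foldl (fun d n => d.insert n 0) PySem.Dict.empty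
  -- for t in tangerine: dic[t] += 1
  let dic1 := tangerine.foldl (fun d t => d.modify t 0 (· + 1)) dic0
  -- dic = sorted(dic.items(), reverse=True, key=lambda x: x[1])
  let dic := PySem.List.sorted dic1.items (fun x => x.2) true
  solLoop k dic 0 0

-- ===== PORT B =====
-- the inner 'for _ in range(buckets.get(c, 0)) … return answer' loop: .inl = early return, .inr = go on
def altInner (k c : Int) : Nat → Int → Int → Sum Int (Int × Int)
  | 0, s, answer => .inr (s, answer)
  | n + 1, s, answer =>
      if s + c ≥ k then .inl (answer + 1)
      else altInner k c n (s + c) (answer + 1)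

-- the outer 'for c in range(maxc, 0, -1)' loop
def altOuter (k : Int) (buckets : PySem.Dict Int Int) : List Int → Int → Int → Int
  | [], _, answer => answer
  | c :: cs, s, answer =>
      match altInner k c (buckets.getD c 0).toNat s answer with
      | .inl a => a
      | .inr (s', a) => altOuter k buckets cs s' a

def solution_alt (k : Int) (tangerine : List Int) : Int :=
  if tangerine = [] then 0
  else
    let cnt : PySem.Dict Int Int :=
      tangerine.foldl (fun d t => d.insert t (d.getD t 0 + 1)) PySem.Dict.empty
    let buckets : PySem.Dict Int Int :=
      cnt.values.foldl (fun d c => d.insert c (d.getD c 0 + 1)) PySem.Dict.empty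
    -- maxc = max(buckets): buckets is nonempty here, so Python's max returns; .getD 0 is unreachable
    let maxc := (PySem.List.max? buckets.keys (fun x => x)).getD 0
    altOuter k buckets (PySem.List.pyRange maxc 0 (-1)) 0 0

-- ===== PRECONDITION & SPEC =====
def Spec_solution (k : Int) (tangerine : List Int) (out : Int) : Prop := out = solution_alt k tangerine
instance (k : Int) (tangerine : List Int) (out : Int) : Decidable (Spec_solution k tangerine out) := by unfold Spec_solution; infer_instance

-- ===== CLAIM (what is proved, stated in full; the proofs are below) =====
def Claim_equal_solution : Prop := ∀ (k : Int) (tangerine : List Int), Dom_solution k tangerine → Spec_solution k tangerine (solution k tangerine)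

-- ===== LEMMAS AND PROOFS =====

-- the common greedy skeleton both loops compute: consume counts until the running sum reaches k
def pvGreedy (k : Int) : List Int → Int → Int → Int
  | [], _, a => a
  | c :: rest, s, a => if s + c ≥ k then a + 1 else pvGreedy k rest (s + c) (a + 1)

-- pvGreedy with the loop's exit status, matching altInner's Sum shape
def pvGreedyS (k : Int) : List Int → Int → Int → Sum Int (Int × Int)
  | [], s, a => .inr (s, a)
  | c :: rest, s, a => if s + c ≥ k then .inl (a + 1) else pvGreedyS k rest (s + c) (a + 1)

theorem pvGreedy_append (k : Int) (l1 l2 : List Int) (s a : Int) :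
    pvGreedy k (l1 ++ l2) s a =
      (match pvGreedyS k l1 s a with
       | .inl a' => a'
       | .inr (s', a') => pvGreedy k l2 s' a') := by
  induction l1 generalizing s a with
  | nil => rfl
  | cons c rest ih =>
      simp only [List.cons_append, pvGreedy, pvGreedyS]
      split_ifs with h
      · rfl
      · exact ih _ _

theorem solLoop_eq_pvGreedy (k : Int) (l : List (Int × Int)) (s a : Int) :
    solLoop k l s a = pvGreedy k (l.map (·.2)) s a := by
  induction l generalizing s a with
  | nil => rfl
  | cons p rest ih =>
      simp only [solLoop, List.map_cons, pvGreedy]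
      split_ifs with h
      · rfl
      · exact ih _ _

theorem altInner_eq_pvGreedyS (k c : Int) (n : Nat) (s a : Int) :
    altInner k c n s a = pvGreedyS k (List.replicate n c) s a := by
  induction n generalizing s a with
  | zero => rfl
  | succ m ih =>
      simp only [altInner, List.replicate_succ, pvGreedyS]
      split_ifs with h
      · rfl
      · exact ih _ _

theorem altOuter_eq_pvGreedy (k : Int) (b : PySem.Dict Int Int) (cs : List Int) (s a : Int) :
    altOuter k b cs s a =
      pvGreedy k (cs.flatMap (fun c => List.replicate (b.getD c 0).toNat c)) s a := by
  induction cs generalizing s a with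
  | nil => rfl
  | cons c rest ih =>
      simp only [altOuter, List.flatMap_cons, pvGreedy_append, altInner_eq_pvGreedyS]
      cases pvGreedyS k (List.replicate (b.getD c 0).toNat c) s a with
      | inl a' => rfl
      | inr p => exact ih _ _

-- A's init dict {n:0 for n in set(tangerine)} + increment loop holds each distinct size with its count
theorem pv_set_update_subset (l s : List Int) (h : ∀ x ∈ l, x ∈ s) : PySem.Set.update s l = s := by
  induction l generalizing s with
  | nil => rfl
  | cons x xs ih =>
      have hx : x ∈ s := h x (by simp)
      have hadd : PySem.Set.add s x = s := by
        simp [PySem.Set.add, PySem.Set.contains, hx]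
      calc PySem.Set.update s (x :: xs) = PySem.Set.update (PySem.Set.add s x) xs := rfl
        _ = s := by rw [hadd]; exact ih s (fun y hy => h y (by simp [hy]))

theorem pv_a_items (tangerine : List Int) :
    ((tangerine.foldl (fun d t => d.modify t 0 (· + 1))
      ((PySem.Set.ofList tangerine).foldl (fun d n => d.insert n 0) PySem.Dict.empty)).items)
    = (PySem.Set.ofList tangerine).map (fun n => (n, (tangerine.count n : Int))) := by
  set d0 := (PySem.Set.ofList tangerine).foldl (fun d n => d.insert n 0) (PySem.Dict.empty (κ := Int) (ν := Int)) with hd0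
  set d1 := tangerine.foldl (fun d t => d.modify t 0 (· + 1)) d0 with hd1
  have hitems0 : d0.items = (PySem.Set.ofList tangerine).map (fun n => (n, (0 : Int))) := by
    have := PySem.Dict.items_foldl_insert_fresh (l := PySem.Set.ofList tangerine)
      (k := fun n => n) (v := fun _ => (0 : Int)) (d := PySem.Dict.empty)
      (by intro a _; exact PySem.Dict.contains_empty a)
      (by simp only [List.map_id_fun']; exact PySem.Set.nodup_ofList tangerine)
    simpa using this
  have hkeys0 : d0.keys = PySem.Set.ofList tangerine := by
    rw [PySem.Dict.keys, hitems0, List.map_map]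
    exact List.map_congr_left (fun x _ => rfl) |>.trans (List.map_id _)
  have hkeys1 : d1.keys = PySem.Set.ofList tangerine := by
    rw [hd1, PySem.Dict.keys_foldl_modify, hkeys0]
    exact pv_set_update_subset _ _ (fun x hx => (PySem.Set.mem_ofList _ _).mpr hx)
  have hnd1 : d1.keys.Nodup := by rw [hkeys1]; exact PySem.Set.nodup_ofList tangerine
  have hget0 : ∀ n : Int, d0.getD n 0 = 0 := by
    intro n
    by_cases hn : n ∈ PySem.Set.ofList tangerine
    · exact PySem.Dict.getD_of_mem_items d0
        (by rw [hitems0]; exact List.mem_map.mpr ⟨n, hn, rfl⟩)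
        (by rw [hkeys0]; exact PySem.Set.nodup_ofList tangerine) 0
    · exact PySem.Dict.getD_of_not_contains d0 0
        (by rw [PySem.Dict.contains_eq_decide_mem_keys, hkeys0]; simpa using hn)
  have hget1 : ∀ n : Int, d1.getD n 0 = tangerine.count n := by
    intro n
    rw [hd1, PySem.Dict.getD_foldl_modify_add_one, hget0, zero_add]
  rw [PySem.Dict.items_eq_map_keys d1 hnd1 0, hkeys1]
  exact List.map_congr_left (fun n _ => by rw [hget1])

-- counting the multiset produced by the bucket scan
theorem pv_count_flat (V : List Int) (l : List Int) (hnd : l.Nodup) (x : Int) :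
    (l.flatMap (fun c => List.replicate (V.count c) c)).count x
      = if x ∈ l then V.count x else 0 := by
  induction l with
  | nil => simp
  | cons c cs ih =>
      rcases List.nodup_cons.mp hnd with ⟨hc, hcs⟩
      rw [List.flatMap_cons, List.count_append, ih hcs, List.count_replicate]
      by_cases hx : x = c
      · subst hx
        simp [hc]
      · simp [hx, Ne.symm hx]

-- the bucket scan emits the counts in non-increasing order
theorem pv_flat_pairwise (V : List Int) (l : List Int) (hl : l.Pairwise (fun a b => b < a)) :
    (l.flatMap (fun c => List.replicate (V.count c) c)).Pairwise (fun a b : Int => b ≤ a) := by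
  rw [List.flatMap_def, List.pairwise_flatten]
  refine ⟨?_, ?_⟩
  · intro l' hl'
    rcases List.mem_map.mp hl' with ⟨c, _, rfl⟩
    exact List.pairwise_replicate_of_refl
  · rw [List.pairwise_map]
    refine hl.imp_of_mem ?_
    intro a b _ _ hba x hx y hy
    rw [List.eq_of_mem_replicate hx, List.eq_of_mem_replicate hy]
    exact le_of_lt hba

theorem pv_ofList_ne_nil (xs : List Int) (h : xs ≠ []) : PySem.Set.ofList xs ≠ [] := by
  cases xs with
  | nil => simp at h
  | cons t ts =>
      intro hc
      have := (PySem.Set.mem_ofList (t :: ts) t).mpr (by simp)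
      rw [hc] at this
      simp at this

-- ===== VERDICT (by name: the statement is the Claim_ definition above) =====
theorem solution_spec : Claim_equal_solution := by
  intro k tangerine _
  unfold Spec_solution
  by_cases hemp : tangerine = []
  · subst hemp; rfl
  · -- the distinct sizes with their counts, as A's dict (and B's Counter) hold them
    have hA : solution k tangerine =
        pvGreedy k ((PySem.List.sorted
          ((PySem.Set.ofList tangerine).map (fun n => (n, (tangerine.count n : Int))))
          (fun x => x.2) true).map (·.2)) 0 0 := by
      simp only [solution]
      rw [pv_a_items, solLoop_eq_pvGreedy]
    -- B's Counter values: the same counts, in first-occurrence order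
    set V := (PySem.Set.ofList tangerine).map (fun n => (tangerine.count n : Int)) with hV
    have hvals : (PySem.Dict.counter tangerine).values = V := by
      rw [PySem.Dict.values, PySem.Dict.items_counter, List.map_map]
      rfl
    have hVmem : ∀ x ∈ V, 0 < x := by
      intro x hx
      rcases List.mem_map.mp hx with ⟨n, hn, rfl⟩
      exact_mod_cast List.count_pos_iff.mpr ((PySem.Set.mem_ofList _ _).mp hn)
    -- maxc = max(buckets) is some m with every count ≤ m
    have hVne : V ≠ [] := by
      rw [hV]
      intro hc
      exact pv_ofList_ne_nil tangerine hemp (List.map_eq_nil_iff.mp hc)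
    cases hm : PySem.List.max? (PySem.Set.ofList V) (fun x => x) with
    | none =>
        exact absurd ((PySem.List.max?_eq_none_iff _ _).mp hm) (pv_ofList_ne_nil _ hVne)
    | some m =>
        have hle : ∀ x ∈ V, x ≤ m := fun x hx =>
          PySem.List.max?_isMax hm x ((PySem.Set.mem_ofList _ _).mpr hx)
        have hB : solution_alt k tangerine =
            pvGreedy k ((PySem.List.pyRange m 0 (-1)).flatMap
              (fun c => List.replicate (V.count c) c)) 0 0 := by
          simp only [solution_alt, if_neg hemp]
          simp only [PySem.Dict.foldl_insert_getD_add_one_eq_counter]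
          rw [hvals, PySem.Dict.keys_counter, hm, altOuter_eq_pvGreedy]
          simp only [Option.getD_some, PySem.Dict.getD_counter, Int.toNat_natCast]
        -- the two consumed count sequences are equal: same multiset, both non-increasing
        have hndr : (PySem.List.pyRange m 0 (-1)).Nodup := by
          rw [PySem.List.pyRange_neg_one_eq_reverse]
          exact (List.nodup_reverse).mpr (PySem.List.nodup_pyRange_one _ _)
        have hpermW : ((PySem.List.pyRange m 0 (-1)).flatMap
            (fun c => List.replicate (V.count c) c)).Perm V := by
          refine List.perm_iff_count.mpr (fun x => ?_)
          rw [pv_count_flat V _ hndr x]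
          by_cases hx : x ∈ V
          · rw [if_pos (PySem.List.mem_pyRange_neg_one.mpr ⟨hVmem x hx, hle x hx⟩)]
          · rw [List.count_eq_zero.mpr hx]
            simp
        have hpermA : ((PySem.List.sorted
            ((PySem.Set.ofList tangerine).map (fun n => (n, (tangerine.count n : Int))))
            (fun x => x.2) true).map (·.2)).Perm V := by
          have := (PySem.List.sorted_perm
            ((PySem.Set.ofList tangerine).map (fun n => (n, (tangerine.count n : Int))))
            (fun x => x.2) true).map (·.2)
          rw [List.map_map] at this
          exact this
        have heq : ((PySem.List.sorted
            ((PySem.Set.ofList tangerine).map (fun n => (n, (tangerine.count n : Int))))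
            (fun x => x.2) true).map (·.2))
            = ((PySem.List.pyRange m 0 (-1)).flatMap (fun c => List.replicate (V.count c) c)) := by
          refine List.Perm.eq_of_pairwise
            (fun a b _ _ h1 h2 => le_antisymm h2 h1) ?_ ?_
            (hpermA.trans hpermW.symm)
          · rw [List.pairwise_map]
            exact PySem.List.sorted_pairwise_rev _ _
          · refine pv_flat_pairwise V _ ?_
            rw [PySem.List.pyRange_neg_one_eq_reverse, List.pairwise_reverse]
            exact PySem.List.pairwise_lt_pyRange_one _ _
        rw [hA, hB, heq]
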